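-- pv_equiv track=rewrite | github.com/ajiteshanddivyanshu/openEHR_nlp | nlp_engine_domain_finetuned.py | _sentence_bounds
-- ===== SOURCE A (Python) =====
-- def _sentence_bounds(text, idx):
--     """Return start/end bounds for the sentence containing idx."""
--     if idx < 0:
--         return 0, len(text)
--     left = max(text.rfind('.', 0, idx), text.rfind('!', 0, idx), text.rfind('?', 0, idx), text.rfind('\n', 0, idx))
--     right_candidates = [
--         p for p in (text.find('.', idx), text.find('!', idx), text.find('?', idx), text.find('\n', idx))
--         if p != -1
--     ]
--     right = min(right_candidates) if right_candidates else len(text)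
--     return left + 1, right
-- ===== SOURCE B (Python) =====
-- def _sentence_bounds(text, idx):
--     """Return start/end bounds for the sentence containing idx."""
--     if idx < 0:
--         return 0, len(text)
--     seps = '.!?\n'
--     n = len(text)
--     left = -1
--     j = min(idx, n) - 1
--     while j >= 0:
--         if text[j] in seps:
--             left = j
--             break
--         j -= 1
--     right = n
--     for k in range(idx, n):
--         if text[k] in seps:
--             right = k
--             break
--     return left + 1, right
-- ===== Notes on version B (the rewrite author's own statement) =====
-- stated objective: alternative
-- what changed: Replaces eight find/rfind library searches combined with max() and a filtered min() by one backward early-exit scan and one forward early-exit scan over the characters, each stopping at the first sentence-ending character.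
import Mathlib
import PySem

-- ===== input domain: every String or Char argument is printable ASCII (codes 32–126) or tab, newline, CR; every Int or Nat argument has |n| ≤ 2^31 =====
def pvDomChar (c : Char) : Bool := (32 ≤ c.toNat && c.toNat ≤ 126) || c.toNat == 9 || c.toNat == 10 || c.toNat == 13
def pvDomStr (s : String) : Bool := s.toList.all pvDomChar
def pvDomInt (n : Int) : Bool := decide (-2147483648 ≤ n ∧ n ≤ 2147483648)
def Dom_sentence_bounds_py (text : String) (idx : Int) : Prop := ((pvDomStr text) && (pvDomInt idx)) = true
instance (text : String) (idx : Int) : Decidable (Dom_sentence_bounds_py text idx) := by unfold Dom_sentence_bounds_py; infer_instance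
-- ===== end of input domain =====

-- B replaces A's eight library find/rfind calls plus max/min with one backward and one
-- forward early-exit scan over the characters (objective: alternative single-scan form).

-- ===== PORT A =====
def sentence_bounds_py (text : String) (idx : Int) : Int × Int :=
  if idx < 0 then (0, PySem.Str.len text)
  else
    let left := max (max (max (PySem.Str.rfindFrom text "." 0 (some idx))
                              (PySem.Str.rfindFrom text "!" 0 (some idx)))
                         (PySem.Str.rfindFrom text "?" 0 (some idx)))
                    (PySem.Str.rfindFrom text "\n" 0 (some idx))
    let right_candidates :=
      ([PySem.Str.findFrom text "." idx none,
        PySem.Str.findFrom text "!" idx none,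
        PySem.Str.findFrom text "?" idx none,
        PySem.Str.findFrom text "\n" idx none]).filter (fun p => p != -1)
    let right : Int :=
      match PySem.List.min? right_candidates (fun p => p) with
      | some m => m
      | none => PySem.Str.len text
    (left + 1, right)

-- ===== PORT B =====
def pvIsSep (c : Char) : Bool := c == '.' || c == '!' || c == '?' || c == '\n'

-- B's backward while-loop: j runs m-1, m-2, …, 0; first separator index, else -1
def pvBScan (L : List Char) : Nat → Int
  | 0 => -1
  | j + 1 => if pvIsSep (L.getD j ' ') then (j : Int) else pvBScan L j

-- B's forward for-loop over range(idx, n): first separator index, else none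
def pvFScan : List Char → Nat → Option Nat
  | [], _ => none
  | c :: rest, k => if pvIsSep c then some k else pvFScan rest (k + 1)

def sentence_bounds_py_alt (text : String) (idx : Int) : Int × Int :=
  if idx < 0 then (0, PySem.Str.len text)
  else
    let L := text.toList
    let n := L.length
    let left := pvBScan L (min idx.toNat n)
    let right : Int :=
      match pvFScan (L.drop idx.toNat) idx.toNat with
      | some k => (k : Int)
      | none => (n : Int)
    (left + 1, right)

-- ===== PRECONDITION & SPEC =====
def Spec_sentence_bounds_py (text : String) (idx : Int) (out : Int × Int) : Prop := out = sentence_bounds_py_alt text idx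
instance (text : String) (idx : Int) (out : Int × Int) : Decidable (Spec_sentence_bounds_py text idx out) := by unfold Spec_sentence_bounds_py; infer_instance

-- ===== CLAIM (what is proved, stated in full; the proofs are below) =====
def Claim_equal_sentence_bounds_py : Prop := ∀ (text : String) (idx : Int), Dom_sentence_bounds_py text idx → Spec_sentence_bounds_py text idx (sentence_bounds_py text idx)

-- ===== LEMMAS AND PROOFS =====

-- single-char backward scan used to characterise rfind
def pvBS1 (L : List Char) (c : Char) : Nat → Int
  | 0 => -1
  | j + 1 => if L.getD j ' ' == c then (j : Int) else pvBS1 L c j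

-- single-char forward scan (offset of first occurrence)
def pvFS1 (c : Char) : List Char → Option Nat
  | [] => none
  | a :: t => if a == c then some 0 else (pvFS1 c t).map (· + 1)

-- first separator offset
def pvFSep : List Char → Option Nat
  | [] => none
  | a :: t => if pvIsSep a then some 0 else (pvFSep t).map (· + 1)

lemma pv_prefix_single (P : List Char) (c : Char) (hc : c ≠ ' ') (x : Nat) :
    [c].isPrefixOf (P.drop x) = (P.getD x ' ' == c) := by
  rcases h : P.drop x with _ | ⟨a, t⟩
  · have hx : P.getD x ' ' = ' ' := by
      have h2 : (P.drop x).head? = P[x]? := List.head?_drop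
      rw [h] at h2
      simp [List.getD_eq_getElem?_getD, ← h2]
    rw [hx]
    simp [List.isPrefixOf]
    intro habs; exact hc habs.symm
  · have hx : P.getD x ' ' = a := by
      have h2 : (P.drop x).head? = P[x]? := List.head?_drop
      rw [h] at h2
      simp [List.getD_eq_getElem?_getD, ← h2]
    rw [hx]
    simp [List.isPrefixOf, Bool.beq_comm]

lemma pv_rfind_go (P : List Char) (c : Char) (hc : c ≠ ' ') :
    ∀ x, PySem.Chars.rfind.go P [c] x = pvBS1 P c (x + 1) := by
  intro x
  induction x with
  | zero =>
      have h0 := pv_prefix_single P c hc 0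
      simp at h0
      simp [PySem.Chars.rfind.go, pvBS1, h0]
  | succ j ih =>
      have hj := pv_prefix_single P c hc (j + 1)
      simp only [PySem.Chars.rfind.go] at *
      simp only [pvBS1, hj, ih]

lemma pv_rfind_single (P : List Char) (c : Char) (hc : c ≠ ' ') :
    PySem.Chars.rfind P [c] = pvBS1 P c P.length := by
  rw [PySem.Chars.rfind, pv_rfind_go P c hc]
  have hg : P.getD P.length ' ' = ' ' := by simp [List.getD_eq_getElem?_getD]
  have hsp : (' ' == c) = false := by
    simp only [beq_eq_false_iff_ne, ne_eq]
    exact fun habs => hc habs.symm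
  simp only [pvBS1, hg, hsp, if_false, Bool.false_eq_true]

lemma pvBS1_lt (L : List Char) (c : Char) : ∀ k, pvBS1 L c k < (k : Int) := by
  intro k
  induction k with
  | zero => simp [pvBS1]
  | succ j ih =>
      simp only [pvBS1]
      split <;> omega

lemma pvBS1_take (L : List Char) (c : Char) (m : Nat) :
    ∀ k, k ≤ m → pvBS1 (L.take m) c k = pvBS1 L c k := by
  intro k
  induction k with
  | zero => simp [pvBS1]
  | succ j ih =>
      intro hk
      have hg : (L.take m).getD j ' ' = L.getD j ' ' := by
        simp [List.getD_eq_getElem?_getD, List.getElem?_take]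
        rw [if_pos (by omega : j < m)]
      simp only [pvBS1, hg, ih (by omega)]

lemma pv_rfindFrom_single (L : List Char) (c : Char) (idx : Int)
    (h : 0 ≤ idx) (hc : c ≠ ' ') :
    PySem.Chars.rfindFrom L [c] 0 (some idx) = pvBS1 L c (min idx.toNat L.length) := by
  have hgo := pv_rfind_go L c hc
  have hsp : (' ' == c) = false := by
    simp only [beq_eq_false_iff_ne, ne_eq]
    exact fun habs => hc habs.symm
  simp only [PySem.Chars.rfindFrom]
  have h0 : ¬ (0 : Int) < 0 := by omega
  have hneg : ¬ idx < 0 := by omega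
  rw [if_neg hneg]
  simp only [if_neg h0, Int.toNat_zero, List.drop_zero]
  by_cases h1 : (L.length : Int) < idx
  · rw [if_pos h1]
    have hm : min idx.toNat L.length = L.length := by omega
    rw [if_neg (by omega : ¬ (L.length : Int) < 0), Int.toNat_natCast, List.take_length,
        pv_rfind_single L c hc, hm]
    by_cases hr : pvBS1 L c L.length = -1
    · simp [hr]
    · simp [hr]
  · rw [if_neg h1]
    have hle : idx.toNat ≤ L.length := by omega
    have hm : min idx.toNat L.length = idx.toNat := by omega
    rw [if_neg hneg, pv_rfind_single _ c hc]
    have hlen : (List.take idx.toNat L).length = idx.toNat := by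
      simp [List.length_take]; omega
    rw [hlen, pvBS1_take L c idx.toNat idx.toNat le_rfl, hm]
    by_cases hr : pvBS1 L c idx.toNat = -1
    · simp [hr]
    · simp [hr]

lemma pv_max4 (L : List Char) : ∀ m,
    max (max (max (pvBS1 L '.' m) (pvBS1 L '!' m)) (pvBS1 L '?' m)) (pvBS1 L '\n' m)
      = pvBScan L m := by
  intro m
  induction m with
  | zero => simp [pvBS1, pvBScan]
  | succ j ih =>
      have l1 := pvBS1_lt L '.' j
      have l2 := pvBS1_lt L '!' j
      have l3 := pvBS1_lt L '?' j
      have l4 := pvBS1_lt L '\n' j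
      by_cases h1 : L.getD j ' ' = '.'
      · simp only [pvBScan, pvBS1, pvIsSep, h1]; simp; omega
      · by_cases h2 : L.getD j ' ' = '!'
        · simp only [pvBScan, pvBS1, pvIsSep, h2]; simp; omega
        · by_cases h3 : L.getD j ' ' = '?'
          · simp only [pvBScan, pvBS1, pvIsSep, h3]; simp; omega
          · by_cases h4 : L.getD j ' ' = '\n'
            · simp only [pvBScan, pvBS1, pvIsSep, h4]; simp; omega
            · have gsep : pvIsSep (L.getD j ' ') = false := by
                simp only [pvIsSep, Bool.or_eq_false_iff, beq_eq_false_iff_ne, ne_eq]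
                exact ⟨⟨⟨h1, h2⟩, h3⟩, h4⟩
              have g1 : (L.getD j ' ' == '.') = false := by
                simp only [beq_eq_false_iff_ne, ne_eq]; exact h1
              have g2 : (L.getD j ' ' == '!') = false := by
                simp only [beq_eq_false_iff_ne, ne_eq]; exact h2
              have g3 : (L.getD j ' ' == '?') = false := by
                simp only [beq_eq_false_iff_ne, ne_eq]; exact h3
              have g4 : (L.getD j ' ' == '\n') = false := by
                simp only [beq_eq_false_iff_ne, ne_eq]; exact h4
              simp only [pvBScan, pvBS1, gsep, g1, g2, g3, g4, Bool.false_eq_true, if_false]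
              exact ih

lemma pv_find_go (c : Char) :
    ∀ (s : List Char) (k : Nat), PySem.Chars.find.go [c] s k =
      (match pvFS1 c s with
       | some o => ((k : Int) + (o : Int))
       | none => -1) := by
  intro s
  induction s with
  | nil => intro k; simp [PySem.Chars.find.go, pvFS1]
  | cons a t ih =>
      intro k
      by_cases h : a = c
      · simp [PySem.Chars.find.go, pvFS1, h, List.isPrefixOf]
      · have hp : [c].isPrefixOf (a :: t) = false := by
          simp [List.isPrefixOf]
          exact fun habs => h habs.symm
        have hf : (a == c) = false := by
          simp only [beq_eq_false_iff_ne, ne_eq]; exact h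
        simp only [PySem.Chars.find.go, hp, hf, Bool.false_eq_true, if_false, pvFS1]
        rw [ih (k + 1)]
        cases hfs : pvFS1 c t with
        | none => simp
        | some o => simp; ring

lemma pv_findFrom_single (L : List Char) (c : Char) (idx : Int) (h : 0 ≤ idx) :
    PySem.Chars.findFrom L [c] idx none =
      (match pvFS1 c (L.drop idx.toNat) with
       | some o => idx + (o : Int)
       | none => -1) := by
  simp only [PySem.Chars.findFrom]
  have hneg : ¬ idx < 0 := by omega
  rw [if_neg hneg]
  by_cases h1 : (L.length : Int) < idx
  · rw [if_pos h1]
    have hd : L.drop idx.toNat = [] := by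
      apply List.drop_eq_nil_of_le
      omega
    rw [hd]
    simp [pvFS1]
  · rw [if_neg h1, Int.toNat_natCast, List.take_length, PySem.Chars.find,
        pv_find_go c (L.drop idx.toNat) 0]
    cases hfs : pvFS1 c (L.drop idx.toNat) with
    | none => simp
    | some o => simp

def pvF (k : Int) : Option Nat → Int
  | some j => k + (j : Int)
  | none => -1

lemma pvF_shift (k : Int) (o : Option Nat) : pvF k (o.map (· + 1)) = pvF (k + 1) o := by
  cases o with
  | none => simp [pvF]
  | some j =>
      simp only [Option.map_some, pvF]
      omega

lemma pvF_bound (k : Int) (o : Option Nat) (hk : 0 ≤ k) : pvF k o = -1 ∨ k ≤ pvF k o := by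
  cases o with
  | none => left; simp [pvF]
  | some j => right; simp [pvF]

lemma pv_fs1_cons_ne (c a : Char) (t : List Char) (h : (a == c) = false) :
    pvFS1 c (a :: t) = (pvFS1 c t).map (· + 1) := by
  simp [pvFS1, h]

lemma pv_fsep_cons_ne (a : Char) (t : List Char) (h : ¬ pvIsSep a = true) :
    pvFSep (a :: t) = (pvFSep t).map (· + 1) := by
  simp [pvFSep, h]

lemma pv_isSep_cases (a : Char) (h : pvIsSep a = true) :
    a = '.' ∨ a = '!' ∨ a = '?' ∨ a = '\n' := by
  simp [pvIsSep] at h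
  tauto

lemma pv_not_isSep_cases (a : Char) (h : ¬ pvIsSep a = true) :
    (a == '.') = false ∧ (a == '!') = false ∧ (a == '?') = false ∧ (a == '\n') = false := by
  simp [pvIsSep] at h
  obtain ⟨⟨⟨n1, n2⟩, n3⟩, n4⟩ := h
  refine ⟨?_, ?_, ?_, ?_⟩ <;> simp only [beq_eq_false_iff_ne, ne_eq] <;> assumption

lemma pv_foldl_min (k : Int) : ∀ (l : List Int) (a : Int),
    (∀ x ∈ l, k ≤ x) → k ≤ a → (a = k ∨ k ∈ l) → List.foldl min a l = k := by
  intro l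
  induction l with
  | nil =>
      intro a _ _ h
      rcases h with h | h
      · exact h
      · simp at h
  | cons b t ih =>
      intro a hall ha h
      have hb : k ≤ b := hall b (by simp)
      simp only [List.foldl]
      apply ih
      · intro x hx; exact hall x (by simp [hx])
      · omega
      · rcases h with h | h
        · left; omega
        · simp at h
          rcases h with h | h
          · left; omega
          · right; exact h

lemma pv_min?_cons_eq : ∀ (t : List Int) (x : Int),
    PySem.List.min? (x :: t) (fun p => p) = some (List.foldl min x t) := by
  intro t
  induction t with
  | nil => intro x; simp [PySem.List.min?]
  | cons b t ih =>
      intro x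
      have hstep : PySem.List.min? (x :: b :: t) (fun p => p)
          = PySem.List.min? (min x b :: t) (fun p => p) := by
        simp only [PySem.List.min?, List.foldl]
        congr 1
        split_ifs <;> simp <;> omega
      rw [hstep, ih]
      simp [List.foldl]

lemma pv_min?_some (l : List Int) (k : Int) (hmem : k ∈ l) (hall : ∀ x ∈ l, k ≤ x) :
    PySem.List.min? l (fun p => p) = some k := by
  cases l with
  | nil => simp at hmem
  | cons x t =>
      rw [pv_min?_cons_eq]
      congr 1
      apply pv_foldl_min
      · intro y hy; exact hall y (by simp [hy])
      · exact hall x (by simp)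
      · rcases List.mem_cons.mp hmem with h | h
        · left; exact h.symm
        · right; exact h

lemma pv_minf_designated (k x2 x3 x4 : Int) (hk : 0 ≤ k)
    (h2 : x2 = -1 ∨ k + 1 ≤ x2) (h3 : x3 = -1 ∨ k + 1 ≤ x3) (h4 : x4 = -1 ∨ k + 1 ≤ x4) :
    PySem.List.min? (([k, x2, x3, x4]).filter (fun p => p != -1)) (fun p => p) = some k := by
  apply pv_min?_some
  · simp only [List.mem_filter, bne_iff_ne, ne_eq]
    exact ⟨by simp, by omega⟩
  · intro y hy
    simp only [List.mem_filter, bne_iff_ne, ne_eq, List.mem_cons, List.not_mem_nil, or_false] at hy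
    rcases hy with ⟨h | h | h | h, hne⟩ <;> subst h <;>
      first
        | omega
        | (rcases h2 with h | h; · exact absurd h hne; · omega)
        | (rcases h3 with h | h; · exact absurd h hne; · omega)
        | (rcases h4 with h | h; · exact absurd h hne; · omega)

lemma pv_minf_designated2 (k x1 x3 x4 : Int) (hk : 0 ≤ k)
    (h1 : x1 = -1 ∨ k + 1 ≤ x1) (h3 : x3 = -1 ∨ k + 1 ≤ x3) (h4 : x4 = -1 ∨ k + 1 ≤ x4) :
    PySem.List.min? (([x1, k, x3, x4]).filter (fun p => p != -1)) (fun p => p) = some k := by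
  apply pv_min?_some
  · simp only [List.mem_filter, bne_iff_ne, ne_eq]
    exact ⟨by simp, by omega⟩
  · intro y hy
    simp only [List.mem_filter, bne_iff_ne, ne_eq, List.mem_cons, List.not_mem_nil, or_false] at hy
    rcases hy with ⟨h | h | h | h, hne⟩ <;> subst h <;>
      first
        | omega
        | (rcases h1 with h | h; · exact absurd h hne; · omega)
        | (rcases h3 with h | h; · exact absurd h hne; · omega)
        | (rcases h4 with h | h; · exact absurd h hne; · omega)

lemma pv_minf_designated3 (k x1 x2 x4 : Int) (hk : 0 ≤ k)
    (h1 : x1 = -1 ∨ k + 1 ≤ x1) (h2 : x2 = -1 ∨ k + 1 ≤ x2) (h4 : x4 = -1 ∨ k + 1 ≤ x4) :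
    PySem.List.min? (([x1, x2, k, x4]).filter (fun p => p != -1)) (fun p => p) = some k := by
  apply pv_min?_some
  · simp only [List.mem_filter, bne_iff_ne, ne_eq]
    exact ⟨by simp, by omega⟩
  · intro y hy
    simp only [List.mem_filter, bne_iff_ne, ne_eq, List.mem_cons, List.not_mem_nil, or_false] at hy
    rcases hy with ⟨h | h | h | h, hne⟩ <;> subst h <;>
      first
        | omega
        | (rcases h1 with h | h; · exact absurd h hne; · omega)
        | (rcases h2 with h | h; · exact absurd h hne; · omega)
        | (rcases h4 with h | h; · exact absurd h hne; · omega)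

lemma pv_minf_designated4 (k x1 x2 x3 : Int) (hk : 0 ≤ k)
    (h1 : x1 = -1 ∨ k + 1 ≤ x1) (h2 : x2 = -1 ∨ k + 1 ≤ x2) (h3 : x3 = -1 ∨ k + 1 ≤ x3) :
    PySem.List.min? (([x1, x2, x3, k]).filter (fun p => p != -1)) (fun p => p) = some k := by
  apply pv_min?_some
  · simp only [List.mem_filter, bne_iff_ne, ne_eq]
    exact ⟨by simp, by omega⟩
  · intro y hy
    simp only [List.mem_filter, bne_iff_ne, ne_eq, List.mem_cons, List.not_mem_nil, or_false] at hy
    rcases hy with ⟨h | h | h | h, hne⟩ <;> subst h <;>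
      first
        | omega
        | (rcases h1 with h | h; · exact absurd h hne; · omega)
        | (rcases h2 with h | h; · exact absurd h hne; · omega)
        | (rcases h3 with h | h; · exact absurd h hne; · omega)

lemma pv_min4 (D : List Char) : ∀ (k : Int), 0 ≤ k →
    PySem.List.min?
      (([pvF k (pvFS1 '.' D), pvF k (pvFS1 '!' D), pvF k (pvFS1 '?' D), pvF k (pvFS1 '\n' D)]).filter
        (fun p => p != -1)) (fun p => p)
      = (pvFSep D).map (fun j => k + (j : Int)) := by
  induction D with
  | nil =>
      intro k hk
      simp [pvFS1, pvFSep, pvF, PySem.List.min?]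
  | cons a t ih =>
      intro k hk
      by_cases hsep : pvIsSep a = true
      · have hk1 : (0 : Int) ≤ k + 1 := by omega
        have hb2 := pvF_bound (k + 1) (pvFS1 '!' t) hk1
        have hb3 := pvF_bound (k + 1) (pvFS1 '?' t) hk1
        have hb4 := pvF_bound (k + 1) (pvFS1 '\n' t) hk1
        have hb1 := pvF_bound (k + 1) (pvFS1 '.' t) hk1
        rcases pv_isSep_cases a hsep with h | h | h | h
        · subst h
          have e1 : pvF k (pvFS1 '.' ('.' :: t)) = k := by simp [pvFS1, pvF]
          have e2 : pvF k (pvFS1 '!' ('.' :: t)) = pvF (k + 1) (pvFS1 '!' t) := by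
            rw [pv_fs1_cons_ne '!' '.' t (by decide), pvF_shift]
          have e3 : pvF k (pvFS1 '?' ('.' :: t)) = pvF (k + 1) (pvFS1 '?' t) := by
            rw [pv_fs1_cons_ne '?' '.' t (by decide), pvF_shift]
          have e4 : pvF k (pvFS1 '\n' ('.' :: t)) = pvF (k + 1) (pvFS1 '\n' t) := by
            rw [pv_fs1_cons_ne '\n' '.' t (by decide), pvF_shift]
          rw [e1, e2, e3, e4, pv_minf_designated k _ _ _ hk hb2 hb3 hb4]
          simp [pvFSep, pvIsSep]
        · subst h
          have e1 : pvF k (pvFS1 '.' ('!' :: t)) = pvF (k + 1) (pvFS1 '.' t) := by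
            rw [pv_fs1_cons_ne '.' '!' t (by decide), pvF_shift]
          have e2 : pvF k (pvFS1 '!' ('!' :: t)) = k := by simp [pvFS1, pvF]
          have e3 : pvF k (pvFS1 '?' ('!' :: t)) = pvF (k + 1) (pvFS1 '?' t) := by
            rw [pv_fs1_cons_ne '?' '!' t (by decide), pvF_shift]
          have e4 : pvF k (pvFS1 '\n' ('!' :: t)) = pvF (k + 1) (pvFS1 '\n' t) := by
            rw [pv_fs1_cons_ne '\n' '!' t (by decide), pvF_shift]
          rw [e1, e2, e3, e4, pv_minf_designated2 k _ _ _ hk hb1 hb3 hb4]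
          simp [pvFSep, pvIsSep]
        · subst h
          have e1 : pvF k (pvFS1 '.' ('?' :: t)) = pvF (k + 1) (pvFS1 '.' t) := by
            rw [pv_fs1_cons_ne '.' '?' t (by decide), pvF_shift]
          have e2 : pvF k (pvFS1 '!' ('?' :: t)) = pvF (k + 1) (pvFS1 '!' t) := by
            rw [pv_fs1_cons_ne '!' '?' t (by decide), pvF_shift]
          have e3 : pvF k (pvFS1 '?' ('?' :: t)) = k := by simp [pvFS1, pvF]
          have e4 : pvF k (pvFS1 '\n' ('?' :: t)) = pvF (k + 1) (pvFS1 '\n' t) := by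
            rw [pv_fs1_cons_ne '\n' '?' t (by decide), pvF_shift]
          rw [e1, e2, e3, e4, pv_minf_designated3 k _ _ _ hk hb1 hb2 hb4]
          simp [pvFSep, pvIsSep]
        · subst h
          have e1 : pvF k (pvFS1 '.' ('\n' :: t)) = pvF (k + 1) (pvFS1 '.' t) := by
            rw [pv_fs1_cons_ne '.' '\n' t (by decide), pvF_shift]
          have e2 : pvF k (pvFS1 '!' ('\n' :: t)) = pvF (k + 1) (pvFS1 '!' t) := by
            rw [pv_fs1_cons_ne '!' '\n' t (by decide), pvF_shift]
          have e3 : pvF k (pvFS1 '?' ('\n' :: t)) = pvF (k + 1) (pvFS1 '?' t) := by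
            rw [pv_fs1_cons_ne '?' '\n' t (by decide), pvF_shift]
          have e4 : pvF k (pvFS1 '\n' ('\n' :: t)) = k := by simp [pvFS1, pvF]
          rw [e1, e2, e3, e4, pv_minf_designated4 k _ _ _ hk hb1 hb2 hb3]
          simp [pvFSep, pvIsSep]
      · rcases pv_not_isSep_cases a hsep with ⟨n1, n2, n3, n4⟩
        have e1 : pvF k (pvFS1 '.' (a :: t)) = pvF (k + 1) (pvFS1 '.' t) := by
          rw [pv_fs1_cons_ne '.' a t n1, pvF_shift]
        have e2 : pvF k (pvFS1 '!' (a :: t)) = pvF (k + 1) (pvFS1 '!' t) := by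
          rw [pv_fs1_cons_ne '!' a t n2, pvF_shift]
        have e3 : pvF k (pvFS1 '?' (a :: t)) = pvF (k + 1) (pvFS1 '?' t) := by
          rw [pv_fs1_cons_ne '?' a t n3, pvF_shift]
        have e4 : pvF k (pvFS1 '\n' (a :: t)) = pvF (k + 1) (pvFS1 '\n' t) := by
          rw [pv_fs1_cons_ne '\n' a t n4, pvF_shift]
        rw [e1, e2, e3, e4, ih (k + 1) (by omega)]
        rw [pv_fsep_cons_ne a t hsep]
        cases hfs : pvFSep t with
        | none => simp
        | some o => simp; omega

lemma pv_fscan_fsep (D : List Char) : ∀ k, pvFScan D k = (pvFSep D).map (fun j => k + j) := by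
  induction D with
  | nil => intro k; simp [pvFScan, pvFSep]
  | cons a t ih =>
      intro k
      by_cases h : pvIsSep a = true
      · simp [pvFScan, pvFSep, h]
      · simp only [pvFScan, pvFSep, h, if_false, Bool.false_eq_true]
        rw [ih (k + 1)]
        cases hfs : pvFSep t with
        | none => simp
        | some o => simp; omega

-- ===== VERDICT (by name: the statement is the Claim_ definition above) =====
theorem sentence_bounds_py_spec : Claim_equal_sentence_bounds_py := by
  intro text idx _
  unfold Spec_sentence_bounds_py sentence_bounds_py sentence_bounds_py_alt
  by_cases hneg : idx < 0
  · rw [if_pos hneg, if_pos hneg]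
  · rw [if_neg hneg, if_neg hneg]
    have hidx : 0 ≤ idx := by omega
    have t1 : (".").toList = ['.'] := by decide
    have t2 : ("!").toList = ['!'] := by decide
    have t3 : ("?").toList = ['?'] := by decide
    have t4 : ("\n").toList = ['\n'] := by decide
    have hL1 : PySem.Str.rfindFrom text "." 0 (some idx)
        = pvBS1 text.toList '.' (min idx.toNat text.toList.length) := by
      rw [PySem.Str.rfindFrom_eq, t1, pv_rfindFrom_single _ _ _ hidx (by decide)]
    have hL2 : PySem.Str.rfindFrom text "!" 0 (some idx)
        = pvBS1 text.toList '!' (min idx.toNat text.toList.length) := by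
      rw [PySem.Str.rfindFrom_eq, t2, pv_rfindFrom_single _ _ _ hidx (by decide)]
    have hL3 : PySem.Str.rfindFrom text "?" 0 (some idx)
        = pvBS1 text.toList '?' (min idx.toNat text.toList.length) := by
      rw [PySem.Str.rfindFrom_eq, t3, pv_rfindFrom_single _ _ _ hidx (by decide)]
    have hL4 : PySem.Str.rfindFrom text "\n" 0 (some idx)
        = pvBS1 text.toList '\n' (min idx.toNat text.toList.length) := by
      rw [PySem.Str.rfindFrom_eq, t4, pv_rfindFrom_single _ _ _ hidx (by decide)]
    have hR1 : PySem.Str.findFrom text "." idx none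
        = pvF idx (pvFS1 '.' (text.toList.drop idx.toNat)) := by
      rw [show PySem.Str.findFrom text "." idx none
            = PySem.Chars.findFrom text.toList ".".toList idx none from rfl, t1,
          pv_findFrom_single _ _ _ hidx]
      cases pvFS1 '.' (text.toList.drop idx.toNat) <;> rfl
    have hR2 : PySem.Str.findFrom text "!" idx none
        = pvF idx (pvFS1 '!' (text.toList.drop idx.toNat)) := by
      rw [show PySem.Str.findFrom text "!" idx none
            = PySem.Chars.findFrom text.toList "!".toList idx none from rfl, t2,
          pv_findFrom_single _ _ _ hidx]
      cases pvFS1 '!' (text.toList.drop idx.toNat) <;> rfl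
    have hR3 : PySem.Str.findFrom text "?" idx none
        = pvF idx (pvFS1 '?' (text.toList.drop idx.toNat)) := by
      rw [show PySem.Str.findFrom text "?" idx none
            = PySem.Chars.findFrom text.toList "?".toList idx none from rfl, t3,
          pv_findFrom_single _ _ _ hidx]
      cases pvFS1 '?' (text.toList.drop idx.toNat) <;> rfl
    have hR4 : PySem.Str.findFrom text "\n" idx none
        = pvF idx (pvFS1 '\n' (text.toList.drop idx.toNat)) := by
      rw [show PySem.Str.findFrom text "\n" idx none
            = PySem.Chars.findFrom text.toList "\n".toList idx none from rfl, t4,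
          pv_findFrom_single _ _ _ hidx]
      cases pvFS1 '\n' (text.toList.drop idx.toNat) <;> rfl
    simp only [hL1, hL2, hL3, hL4, hR1, hR2, hR3, hR4,
      pv_max4 text.toList (min idx.toNat text.toList.length),
      pv_min4 (text.toList.drop idx.toNat) idx hidx,
      pv_fscan_fsep (text.toList.drop idx.toNat) idx.toNat]
    cases hfs : pvFSep (text.toList.drop idx.toNat) with
    | none => simp
    | some o =>
        simp [hfs]
        omega
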